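-- pv_equiv track=rewrite | github.com/peas-vr/v2s | v2s.py | downsample_frames_and_durations
-- ===== SOURCE A (Python) =====
-- def downsample_frames_and_durations(frames, durations):
--     while len(frames) > 64:
--         new_frames = frames[::2]
--         new_durations = []
--
--         for i in range(0, len(durations), 2):
--             if i+1 < len(durations):
--                 new_durations.append(durations[i] + durations[i+1])
--             else:
--                 new_durations.append(durations[i])
--
--         frames, durations = new_frames, new_durations
--
--     return frames[:64], durations[:64]
-- ===== SOURCE B (Python) =====
-- def downsample_frames_and_durations(frames, durations):
--     n = len(frames)
--     k = 0
--     while n > 64: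
--         n = (n + 1) // 2
--         k += 1
--     stride = 1 << k
--     new_frames = frames[::stride][:64]
--     new_durations = [sum(durations[i:i + stride])
--                      for i in range(0, len(durations), stride)][:64]
--     return new_frames, new_durations
-- ===== Notes on version B (the rewrite author's own statement) =====
-- stated objective: faster
-- what changed: Instead of repeatedly halving the lists (frames[::2] and pairwise duration sums) until <=64 frames, B computes the number of halvings k from len(frames) alone, then takes frames with stride 2^k and sums durations in blocks of 2^k in a single pass.
import Mathlib
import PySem

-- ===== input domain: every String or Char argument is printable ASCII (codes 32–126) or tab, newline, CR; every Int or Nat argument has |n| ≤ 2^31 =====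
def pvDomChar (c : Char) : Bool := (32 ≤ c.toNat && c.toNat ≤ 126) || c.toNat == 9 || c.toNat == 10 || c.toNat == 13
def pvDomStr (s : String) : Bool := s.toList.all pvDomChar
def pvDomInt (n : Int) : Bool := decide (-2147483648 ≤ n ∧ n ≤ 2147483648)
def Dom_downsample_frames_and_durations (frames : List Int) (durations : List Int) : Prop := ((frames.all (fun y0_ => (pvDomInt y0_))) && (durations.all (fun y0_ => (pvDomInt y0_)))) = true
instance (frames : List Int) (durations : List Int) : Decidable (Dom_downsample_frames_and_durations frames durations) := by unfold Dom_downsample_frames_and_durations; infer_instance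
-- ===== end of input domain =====

-- B replaces A's repeated halving loop (frames[::2] / pairwise duration sums until <=64 frames)
-- by computing the number of halvings k from len(frames) alone and doing one strided/blocked pass.

-- ===== PORT A =====
-- termination lemma for A's while loop, cited in decreasing_by: frames[::2] is strictly shorter
theorem pv_slice2_length_lt (xs : List Int) (h : 64 < xs.length) :
    ((PySem.List.slice? xs none none 2).getD []).length < xs.length := by
  simp only [PySem.List.slice?, PySem.List.sliceIndices]
  norm_num
  apply lt_of_le_of_lt (List.length_filterMap_le _ _)
  rw [List.length_range]
  split
  · omega
  · omega

def pvPairLoop (durations : List Int) : List Int :=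
  (PySem.List.pyRange 0 (durations.length : Int) 2).foldl
    (fun acc i =>
      if i + 1 < (durations.length : Int) then
        acc ++ [PySem.List.pyGetD durations i 0 + PySem.List.pyGetD durations (i + 1) 0]
      else
        acc ++ [PySem.List.pyGetD durations i 0]) []

def downsample_frames_and_durations (frames : List Int) (durations : List Int) : List Int × List Int :=
  if h : 64 < frames.length then
    downsample_frames_and_durations ((PySem.List.slice? frames none none 2).getD [])
      (pvPairLoop durations)
  else
    (PySem.List.slice frames none (some 64), PySem.List.slice durations none (some 64))
termination_by frames.length
decreasing_by exact pv_slice2_length_lt frames h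


-- ===== PORT B =====
def pvKSteps (n : Int) : Nat :=
  if 64 < n then pvKSteps (PySem.Int.floordiv (n + 1) 2) + 1 else 0
termination_by n.toNat
decreasing_by
  rw [PySem.Int.floordiv_eq_ediv_of_pos (by norm_num)]
  omega

def downsample_frames_and_durations_alt (frames : List Int) (durations : List Int) : List Int × List Int :=
  let k := pvKSteps (frames.length : Int)
  let stride : Int := 1 <<< (k : Int)
  (PySem.List.slice ((PySem.List.slice? frames none none stride).getD []) none (some 64),
   PySem.List.slice
     ((PySem.List.pyRange 0 (durations.length : Int) stride).map
       (fun i => (PySem.List.slice durations (some i) (some (i + stride))).sum))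
     none (some 64))


-- ===== PRECONDITION & SPEC =====
def Spec_downsample_frames_and_durations (frames : List Int) (durations : List Int) (out : List Int × List Int) : Prop := out = downsample_frames_and_durations_alt frames durations
instance (frames : List Int) (durations : List Int) (out : List Int × List Int) : Decidable (Spec_downsample_frames_and_durations frames durations out) := by unfold Spec_downsample_frames_and_durations; infer_instance

-- ===== CLAIM (what is proved, stated in full; the proofs are below) =====
def Claim_equal_downsample_frames_and_durations : Prop := ∀ (frames : List Int) (durations : List Int), Dom_downsample_frames_and_durations frames durations → Spec_downsample_frames_and_durations frames durations (downsample_frames_and_durations frames durations)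

-- ===== LEMMAS AND PROOFS =====

def chunkHeads (s : Nat) : List Int → List Int
  | [] => []
  | a :: t => a :: chunkHeads s (t.drop (s - 1))
termination_by xs => xs.length
decreasing_by simp

def chunkSums (s : Nat) : List Int → List Int
  | [] => []
  | a :: t => (a + (t.take (s - 1)).sum) :: chunkSums s (t.drop (s - 1))
termination_by xs => xs.length
decreasing_by simp

theorem ceil_div_drop (s : Nat) (hs : 0 < s) (t : List Int) :
    ((t.drop (s - 1)).length + s - 1) / s = t.length / s := by
  rw [List.length_drop]
  by_cases h : s - 1 ≤ t.length
  · congr 1; omega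
  · rw [Nat.div_eq_of_lt (by omega), Nat.div_eq_of_lt (by omega)]

theorem ceil_div_cons (s : Nat) (hs : 0 < s) (a : Int) (t : List Int) :
    ((a :: t).length + s - 1) / s = t.length / s + 1 := by
  have h : (a :: t).length + s - 1 = t.length + s := by simp only [List.length_cons]; omega
  rw [h, Nat.add_div_right _ hs]

theorem drop_cons_chunk (s : Nat) (hs : 0 < s) (a : Int) (t : List Int) :
    t.drop (s - 1) = (a :: t).drop s := by
  conv_rhs => rw [show s = (s - 1) + 1 by omega]
  rw [List.drop_succ_cons]

theorem filterMap_range_chunkHeads (s : Nat) (hs : 0 < s) (xs : List Int) :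
    (List.range ((xs.length + s - 1) / s)).filterMap (fun k => xs[s * k]?) = chunkHeads s xs := by
  match xs with
  | [] =>
    have h : (([] : List Int).length + s - 1) / s = 0 := by
      simp only [List.length_nil, Nat.zero_add]; exact Nat.div_eq_of_lt (by omega)
    rw [h, chunkHeads]
    rfl
  | a :: t =>
    rw [ceil_div_cons s hs, ← ceil_div_drop s hs t, List.range_succ_eq_map,
        List.filterMap_cons, List.filterMap_map]
    have h0 : (a :: t)[s * 0]? = some a := by simp
    rw [h0]
    have hf : ((fun k => (a :: t)[s * k]?) ∘ Nat.succ) = fun k => (t.drop (s - 1))[s * k]? := by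
      funext k
      simp only [Function.comp_apply]
      rw [drop_cons_chunk s hs a t, List.getElem?_drop]
      congr 1
      rw [Nat.mul_succ]; omega
    rw [hf, filterMap_range_chunkHeads s hs (t.drop (s - 1)), chunkHeads]
termination_by xs.length
decreasing_by simp

theorem map_range_chunkSums (s : Nat) (hs : 0 < s) (xs : List Int) :
    (List.range ((xs.length + s - 1) / s)).map (fun k => ((xs.drop (s * k)).take s).sum) = chunkSums s xs := by
  match xs with
  | [] =>
    have h : (([] : List Int).length + s - 1) / s = 0 := by
      simp only [List.length_nil, Nat.zero_add]; exact Nat.div_eq_of_lt (by omega)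
    rw [h, chunkSums]
    rfl
  | a :: t =>
    rw [ceil_div_cons s hs, ← ceil_div_drop s hs t, List.range_succ_eq_map, List.map_cons,
        List.map_map]
    have h0 : (((a :: t).drop (s * 0)).take s).sum = a + (t.take (s - 1)).sum := by
      rw [Nat.mul_zero, List.drop_zero, show s = (s - 1) + 1 by omega, List.take_succ_cons]
      simp
    have hf : ((fun k => (((a :: t).drop (s * k)).take s).sum) ∘ Nat.succ)
        = fun k => (((t.drop (s - 1)).drop (s * k)).take s).sum := by
      funext k
      have hd : (t.drop (s - 1)).drop (s * k) = (a :: t).drop (s * Nat.succ k) := by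
        rw [List.drop_drop, show s * Nat.succ k = (s - 1 + s * k) + 1 by rw [Nat.mul_succ]; omega,
            List.drop_succ_cons]
      simp only [Function.comp_apply, hd]
    rw [h0, hf, map_range_chunkSums s hs (t.drop (s - 1)), chunkSums]
termination_by xs.length
decreasing_by simp

theorem slice?_chunkHeads (s : Nat) (hs : 0 < s) (xs : List Int) :
    PySem.List.slice? xs none none (s : Int) = some (chunkHeads s xs) := by
  rw [PySem.List.slice?, if_neg (by exact_mod_cast hs.ne')]
  simp only [PySem.List.sliceIndices]
  have hns : ¬ ((s : Int) < 0) := by omega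
  have hpos : (0 : Int) < (s : Int) := by exact_mod_cast hs
  simp only [if_neg hns, if_pos hpos]
  rcases xs with _ | ⟨a, t⟩
  · norm_num
    rw [chunkHeads]
  · simp only [if_pos (by simp : (0:Int) < ((a :: t).length : Int))]
    have hc : (((((a :: t).length : Int)) - 0 + ↑s - 1) / ↑s).toNat = ((a :: t).length + s - 1) / s := by
      rw [show ((((a :: t).length : Int)) - 0 + ↑s - 1) = (((a :: t).length + s - 1 : Nat) : Int) by push_cast; omega,
          ← Int.natCast_div, Int.toNat_natCast]
    rw [hc]
    rw [← filterMap_range_chunkHeads s hs (a :: t)]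
    have hfun : (fun x : Nat => (a :: t)[((0 : Int) + ↑s * ↑x).toNat]?) = fun k => (a :: t)[s * k]? := by
      funext k
      congr 1
      rw [show ((0 : Int) + ↑s * ↑k) = ((s * k : Nat) : Int) by push_cast; ring, Int.toNat_natCast]
    rw [hfun]

theorem pvChunkMap_eq (s : Nat) (hs : 0 < s) (d : List Int) :
    (PySem.List.pyRange 0 (d.length : Int) (s : Int)).map
      (fun i => (PySem.List.slice d (some i) (some (i + (s : Int)))).sum) = chunkSums s d := by
  rw [PySem.List.pyRange_of_pos 0 (d.length : Int) (by exact_mod_cast hs), List.map_map]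
  have hc : (if (0:Int) < (d.length : Int) then ((((d.length : Int)) - 0 + ↑s - 1) / ↑s).toNat else 0)
      = (d.length + s - 1) / s := by
    by_cases h : (0:Int) < (d.length : Int)
    · rw [if_pos h,
        show ((((d.length : Int)) - 0 + ↑s - 1)) = (((d.length + s - 1 : Nat)) : Int) by push_cast <;> omega,
        ← Int.natCast_div, Int.toNat_natCast]
    · rw [if_neg h]
      have h0 : d.length = 0 := by omega
      rw [h0]
      symm
      exact Nat.div_eq_of_lt (by omega)
  rw [hc, ← map_range_chunkSums s hs d]
  apply List.map_congr_left
  intro k _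
  simp only [Function.comp_apply]
  rw [show ((0 : Int) + ↑s * ↑k) = ((s * k : Nat) : Int) by push_cast; ring,
      show ((((s * k : Nat)) : Int) + (s : Int)) = (((s * k : Nat)) : Int) + ((s : Nat) : Int) by norm_cast,
      PySem.List.slice_natCast_add]

theorem pvPairLoop_eq (d : List Int) : pvPairLoop d = chunkSums 2 d := by
  rw [pvPairLoop]
  have hb : (fun (acc : List Int) (i : Int) =>
      if i + 1 < (d.length : Int) then
        acc ++ [PySem.List.pyGetD d i 0 + PySem.List.pyGetD d (i + 1) 0]
      else
        acc ++ [PySem.List.pyGetD d i 0])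
      = fun acc i => acc ++ [if i + 1 < (d.length : Int) then
          PySem.List.pyGetD d i 0 + PySem.List.pyGetD d (i + 1) 0 else PySem.List.pyGetD d i 0] := by
    funext acc i
    split <;> rfl
  rw [hb, PySem.List.foldl_append_singleton_eq_map, List.nil_append,
      PySem.List.pyRange_of_pos 0 (d.length : Int) (by norm_num : (0:Int) < 2), List.map_map]
  have hc : (if (0:Int) < (d.length : Int) then ((((d.length : Int)) - 0 + 2 - 1) / 2).toNat else 0)
      = (d.length + 2 - 1) / 2 := by
    by_cases h : (0:Int) < (d.length : Int)
    · rw [if_pos h]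
      omega
    · rw [if_neg h]
      have h0 : d.length = 0 := by omega
      rw [h0]
  rw [hc, ← map_range_chunkSums 2 (by omega) d]
  apply List.map_congr_left
  intro k hk
  rw [List.mem_range] at hk
  have h2k : 2 * k < d.length := by omega
  simp only [Function.comp_apply]
  have hi : ((0 : Int) + 2 * ↑k) = ((2 * k : Nat) : Int) := by push_cast; ring
  have hi1 : ((0 : Int) + 2 * ↑k + 1) = ((2 * k + 1 : Nat) : Int) := by push_cast; ring
  rw [hi1, hi, PySem.List.pyGetD_natCast, PySem.List.pyGetD_natCast,
      List.drop_eq_getElem_cons h2k, List.getD_eq_getElem d 0 h2k]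
  by_cases h1 : 2 * k + 1 < d.length
  · rw [if_pos (by exact_mod_cast h1), List.getD_eq_getElem d 0 h1,
        List.drop_eq_getElem_cons h1, List.take_succ_cons, List.take_succ_cons, List.take_zero]
    simp
  · rw [if_neg (by exact_mod_cast h1), List.drop_eq_nil_of_le (by omega)]
    simp

theorem chunkHeads_one (xs : List Int) : chunkHeads 1 xs = xs := by
  induction xs with
  | nil => rw [chunkHeads]
  | cons a t ih => rw [chunkHeads]; simp only [Nat.sub_self, List.drop_zero]; rw [ih]

theorem chunkSums_one (xs : List Int) : chunkSums 1 xs = xs := by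
  induction xs with
  | nil => rw [chunkSums]
  | cons a t ih => rw [chunkSums]; simp only [Nat.sub_self, List.drop_zero, List.take_zero]; rw [ih]; simp

theorem chunkHeads_drop (m : Nat) (xs : List Int) :
    (chunkHeads 2 xs).drop m = chunkHeads 2 (xs.drop (2 * m)) := by
  induction m generalizing xs with
  | zero => simp
  | succ n ih =>
    match xs with
    | [] => rw [chunkHeads]; simp only [List.drop_nil]; rw [chunkHeads]
    | a :: t =>
      rw [chunkHeads, List.drop_succ_cons, ih,
          show 2 * (n + 1) = (2 * n + 1) + 1 by omega, List.drop_succ_cons, List.drop_drop]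
      congr 2
      omega

theorem chunkSums_drop (m : Nat) (xs : List Int) :
    (chunkSums 2 xs).drop m = chunkSums 2 (xs.drop (2 * m)) := by
  induction m generalizing xs with
  | zero => simp
  | succ n ih =>
    match xs with
    | [] => rw [chunkSums]; simp only [List.drop_nil]; rw [chunkSums]
    | a :: t =>
      rw [chunkSums, List.drop_succ_cons, ih,
          show 2 * (n + 1) = (2 * n + 1) + 1 by omega, List.drop_succ_cons, List.drop_drop]
      congr 2
      omega

theorem chunkSums_take_sum (m : Nat) (xs : List Int) :
    ((chunkSums 2 xs).take m).sum = (xs.take (2 * m)).sum := by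
  induction m generalizing xs with
  | zero => simp
  | succ n ih =>
    match xs with
    | [] => rw [chunkSums]; simp
    | a :: t =>
      rw [chunkSums, List.take_succ_cons, List.sum_cons, ih,
          show 2 * (n + 1) = (1 + 2 * n) + 1 by omega, List.take_succ_cons, List.sum_cons,
          List.take_add, List.sum_append]
      ring_nf

theorem chunkHeads_comp (s : Nat) (hs : 0 < s) (xs : List Int) :
    chunkHeads s (chunkHeads 2 xs) = chunkHeads (2 * s) xs := by
  match xs with
  | [] => rw [chunkHeads, chunkHeads, chunkHeads]
  | a :: t =>
    rw [chunkHeads, chunkHeads, chunkHeads, chunkHeads_drop, List.drop_drop,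
        show 2 - 1 + 2 * (s - 1) = 2 * s - 1 by omega,
        chunkHeads_comp s hs (t.drop (2 * s - 1))]
termination_by xs.length
decreasing_by simp

theorem chunkSums_comp (s : Nat) (hs : 0 < s) (xs : List Int) :
    chunkSums s (chunkSums 2 xs) = chunkSums (2 * s) xs := by
  match xs with
  | [] => rw [chunkSums, chunkSums, chunkSums]
  | a :: t =>
    rw [chunkSums, chunkSums, chunkSums, chunkSums_take_sum, chunkSums_drop, List.drop_drop,
        show 2 - 1 + 2 * (s - 1) = 2 * s - 1 by omega,
        chunkSums_comp s hs (t.drop (2 * s - 1))]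
    congr 1
    rw [show 2 * s - 1 = 1 + 2 * (s - 1) by omega, List.take_add, List.sum_append,
        show (2 : Nat) - 1 = 1 by rfl]
    ring
termination_by xs.length
decreasing_by simp

theorem length_chunkHeads2 (xs : List Int) :
    (chunkHeads 2 xs).length = (xs.length + 1) / 2 := by
  match xs with
  | [] => rw [chunkHeads]; rfl
  | a :: t =>
    rw [chunkHeads, List.length_cons, length_chunkHeads2 (t.drop (2 - 1)), List.length_drop]
    simp only [List.length_cons]
    omega
termination_by xs.length
decreasing_by simp


theorem pvKSteps_gt {n : Nat} (h : 64 < n) :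
    pvKSteps (n : Int) = pvKSteps (((n + 1) / 2 : Nat) : Int) + 1 := by
  rw [pvKSteps, if_pos (by exact_mod_cast h),
      show PySem.Int.floordiv ((n : Int) + 1) 2 = (((n + 1) / 2 : Nat) : Int) from by
        rw [show ((n : Int) + 1) = (((n + 1 : Nat)) : Int) by push_cast; ring]
        exact_mod_cast PySem.Int.floordiv_natCast (n + 1) 2]

theorem pvKSteps_le {n : Nat} (h : ¬ 64 < n) : pvKSteps (n : Int) = 0 := by
  rw [pvKSteps, if_neg (by exact_mod_cast h)]

theorem alt_eq (f d : List Int) :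
    downsample_frames_and_durations_alt f d =
      ((chunkHeads (2 ^ pvKSteps (f.length : Int)) f).take 64,
       (chunkSums (2 ^ pvKSteps (f.length : Int)) d).take 64) := by
  rw [downsample_frames_and_durations_alt]
  have hstride : ((1 : Int) <<< ((pvKSteps (f.length : Int) : Nat) : Int))
      = ((2 ^ pvKSteps (f.length : Int) : Nat) : Int) := Int.one_shiftLeft _
  simp only [hstride]
  rw [slice?_chunkHeads _ (Nat.pow_pos (by omega)) f, Option.getD_some,
      pvChunkMap_eq _ (Nat.pow_pos (by omega)) d,
      PySem.List.slice_to _ (by norm_num), PySem.List.slice_to _ (by norm_num)]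
  rfl

theorem main_eq (f d : List Int) :
    downsample_frames_and_durations f d = downsample_frames_and_durations_alt f d := by
  rw [downsample_frames_and_durations]
  by_cases h : 64 < f.length
  · rw [dif_pos h,
        show (2 : Int) = ((2 : Nat) : Int) by rfl, slice?_chunkHeads 2 (by omega) f,
        Option.getD_some, pvPairLoop_eq,
        main_eq (chunkHeads 2 f) (chunkSums 2 d),
        alt_eq, alt_eq, length_chunkHeads2, pvKSteps_gt h,
        chunkHeads_comp _ (Nat.pow_pos (by omega)) f,
        chunkSums_comp _ (Nat.pow_pos (by omega)) d,
        show 2 * 2 ^ pvKSteps (((f.length + 1) / 2 : Nat) : Int)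
          = 2 ^ (pvKSteps (((f.length + 1) / 2 : Nat) : Int) + 1) by rw [pow_succ]; ring]
  · rw [dif_neg h, alt_eq, pvKSteps_le h, pow_zero, chunkHeads_one, chunkSums_one,
        PySem.List.slice_to _ (by norm_num), PySem.List.slice_to _ (by norm_num)]
    rfl
termination_by f.length
decreasing_by rw [length_chunkHeads2]; omega

-- ===== VERDICT (by name: the statement is the Claim_ definition above) =====
theorem downsample_frames_and_durations_spec : Claim_equal_downsample_frames_and_durations := by
  unfold Claim_equal_downsample_frames_and_durations Spec_downsample_frames_and_durations
  exact fun f d _ => main_eq f d
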